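-- pv_equiv track=rewrite | github.com/alloyha/experiments | data/agent_clusterizer/use_cases.py | _generate_mixed_dataset
-- ===== SOURCE A (Python) =====
-- from typing import List, Dict, Any, Tuple
--
-- def _generate_mixed_dataset(size: int) -> List[str]:
--     """Generate mixed-topic dataset of specified size."""
--     topics = {
--         "ml": "Machine learning algorithms and neural networks for predictive analytics",
--         "web": "Web development frameworks and frontend technologies like React",
--         "finance": "Financial markets analysis and trading strategies for investments",
--         "health": "Healthcare systems and medical diagnostic technologies",
--         "ecommerce": "E-commerce platforms and online retail management solutions",
--         "education": "Educational technology and online learning platforms",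
--         "security": "Cybersecurity protocols and network protection systems",
--         "cloud": "Cloud infrastructure and distributed computing architectures",
--         "mobile": "Mobile application development for iOS and Android platforms",
--         "data": "Data analytics and business intelligence reporting tools",
--     }
--
--     result = []
--     for i in range(size):
--         topic = list(topics.values())[i % len(topics)]
--         result.append(f"{topic} - variant {i // len(topics)}")
--
--     return result
-- ===== SOURCE B (Python) =====
-- def _generate_mixed_dataset(size):
--     """Generate mixed-topic dataset of specified size."""
--     values = [
--         "Machine learning algorithms and neural networks for predictive analytics",
--         "Web development frameworks and frontend technologies like React",
--         "Financial markets analysis and trading strategies for investments",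
--         "Healthcare systems and medical diagnostic technologies",
--         "E-commerce platforms and online retail management solutions",
--         "Educational technology and online learning platforms",
--         "Cybersecurity protocols and network protection systems",
--         "Cloud infrastructure and distributed computing architectures",
--         "Mobile application development for iOS and Android platforms",
--         "Data analytics and business intelligence reporting tools",
--     ]
--     result = []
--     v = 0
--     while len(result) < size:
--         for value in values:
--             if len(result) >= size:
--                 break
--             result.append(f"{value} - variant {v}")
--         v += 1
--     return result
-- ===== Notes on version B (the rewrite author's own statement) =====
-- stated objective: alternative
-- what changed: Replaces the flat range(size) loop that computes each row's topic and variant via i % 10 and i // 10 with an explicit nested traversal: an outer while loop over variant numbers and an inner loop over the ten topic values, stopping mid-block when size items have been produced.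
import Mathlib
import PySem

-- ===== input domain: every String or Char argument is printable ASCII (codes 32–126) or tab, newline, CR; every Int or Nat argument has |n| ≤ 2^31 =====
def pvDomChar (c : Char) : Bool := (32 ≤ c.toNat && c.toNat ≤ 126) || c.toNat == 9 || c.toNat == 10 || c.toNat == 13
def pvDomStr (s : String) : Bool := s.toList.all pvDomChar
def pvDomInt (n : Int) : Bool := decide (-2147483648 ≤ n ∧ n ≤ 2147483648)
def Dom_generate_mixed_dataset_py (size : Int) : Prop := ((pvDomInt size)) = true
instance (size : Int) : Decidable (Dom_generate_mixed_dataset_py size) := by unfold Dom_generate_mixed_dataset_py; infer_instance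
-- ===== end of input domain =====

-- B replaces A's flat range(size) loop with i%10 / i//10 arithmetic by an explicit
-- nested variant/topic traversal (objective: alternative decomposition, same output).

-- ===== PORT A =====
-- the topics dict literal
def pvTopicsA : PySem.Dict String String := PySem.Dict.mk [
    ("ml", "Machine learning algorithms and neural networks for predictive analytics"),
    ("web", "Web development frameworks and frontend technologies like React"),
    ("finance", "Financial markets analysis and trading strategies for investments"),
    ("health", "Healthcare systems and medical diagnostic technologies"),
    ("ecommerce", "E-commerce platforms and online retail management solutions"),
    ("education", "Educational technology and online learning platforms"),
    ("security", "Cybersecurity protocols and network protection systems"),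
    ("cloud", "Cloud infrastructure and distributed computing architectures"),
    ("mobile", "Mobile application development for iOS and Android platforms"),
    ("data", "Data analytics and business intelligence reporting tools")]

def generate_mixed_dataset_py (size : Int) : List String :=
  (PySem.List.pyRange 0 size 1).foldl
    (fun result i =>
      -- list(topics.values())[i % len(topics)]: the index is in range for every i, so pyGetD is exact
      let topic := PySem.List.pyGetD pvTopicsA.values (PySem.Int.mod i (pvTopicsA.size : Int)) ""
      result ++ [topic ++ " - variant " ++ PySem.Int.toStr (PySem.Int.floordiv i (pvTopicsA.size : Int))]) []

-- ===== PORT B =====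
def pvValuesB : List String := [
  "Machine learning algorithms and neural networks for predictive analytics",
  "Web development frameworks and frontend technologies like React",
  "Financial markets analysis and trading strategies for investments",
  "Healthcare systems and medical diagnostic technologies",
  "E-commerce platforms and online retail management solutions",
  "Educational technology and online learning platforms",
  "Cybersecurity protocols and network protection systems",
  "Cloud infrastructure and distributed computing architectures",
  "Mobile application development for iOS and Android platforms",
  "Data analytics and business intelligence reporting tools"]

-- inner 'for value in values' loop: append at most `rem` labelled values for variant v
def pvRowB : List String → Int → Nat → List String
  | [], _, _ => []
  | _ :: _, _, 0 => []
  | x :: xs, v, r + 1 => (x ++ " - variant " ++ PySem.Int.toStr v) :: pvRowB xs v r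

-- outer 'while len(result) < size' loop, tracked by the remaining count
def pvFillB (rem : Nat) (v : Int) : List String :=
  if rem = 0 then [] else pvRowB pvValuesB v rem ++ pvFillB (rem - 10) (v + 1)
termination_by rem
decreasing_by omega

def generate_mixed_dataset_py_alt (size : Int) : List String := pvFillB size.toNat 0

-- ===== PRECONDITION & SPEC =====
def Spec_generate_mixed_dataset_py (size : Int) (out : List String) : Prop := out = generate_mixed_dataset_py_alt size
instance (size : Int) (out : List String) : Decidable (Spec_generate_mixed_dataset_py size out) := by unfold Spec_generate_mixed_dataset_py; infer_instance

-- ===== CLAIM (what is proved, stated in full; the proofs are below) =====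
def Claim_equal_generate_mixed_dataset_py : Prop := ∀ (size : Int), Dom_generate_mixed_dataset_py size → Spec_generate_mixed_dataset_py size (generate_mixed_dataset_py size)

-- ===== LEMMAS AND PROOFS =====

-- common closed form both ports are reduced to
def pvItem (v : Int) (i : Nat) : String :=
  pvValuesB.getD (i % 10) "" ++ " - variant " ++ PySem.Int.toStr (v + (i / 10 : Nat))

lemma pvRowB_eq (xs : List String) (v : Int) (r : Nat) :
    pvRowB xs v r = (List.range (min r xs.length)).map
      (fun i => xs.getD i "" ++ " - variant " ++ PySem.Int.toStr v) := by
  induction xs generalizing r with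
  | nil => simp [pvRowB]
  | cons x xs ih =>
    cases r with
    | zero => simp [pvRowB]
    | succ r =>
      have : min (r + 1) (xs.length + 1) = min r xs.length + 1 := by omega
      simp [pvRowB, ih, this, List.range_succ_eq_map, List.map_map, Function.comp]

lemma pvFillB_eq (rem : Nat) (v : Int) :
    pvFillB rem v = (List.range rem).map (pvItem v) := by
  induction rem using Nat.strong_induction_on generalizing v with
  | _ rem ih =>
    rw [pvFillB]
    by_cases h0 : rem = 0
    · simp [h0]
    · rw [if_neg h0, ih (rem - 10) (by omega), pvRowB_eq]
      by_cases h10 : rem ≤ 10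
      · have h1 : rem - 10 = 0 := by omega
        have h2 : min rem pvValuesB.length = rem := by simp [pvValuesB]; omega
        rw [h1, h2]
        simp only [List.range_zero, List.map_nil, List.append_nil]
        refine List.map_congr_left (fun i hi => ?_)
        have hi' : i < rem := List.mem_range.mp hi
        have : i % 10 = i := Nat.mod_eq_of_lt (by omega)
        have hz : i / 10 = 0 := Nat.div_eq_of_lt (by omega)
        simp [pvItem, this, hz]
      · have hsplit : rem = 10 + (rem - 10) := by omega
        have h2 : min rem pvValuesB.length = 10 := by simp [pvValuesB]; omega
        rw [h2]
        conv_rhs => rw [hsplit, List.range_add, List.map_append]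
        congr 1
        · refine List.map_congr_left (fun i hi => ?_)
          have hi' : i < 10 := List.mem_range.mp hi
          have : i % 10 = i := Nat.mod_eq_of_lt hi'
          have hz : i / 10 = 0 := Nat.div_eq_of_lt hi'
          simp [pvItem, this, hz]
        · rw [List.map_map]
          refine List.map_congr_left (fun j _ => ?_)
          have hm : (10 + j) % 10 = j % 10 := by omega
          have hd : (10 + j) / 10 = 1 + j / 10 := by omega
          simp only [Function.comp, pvItem, hm, hd]
          congr 2
          push_cast
          ring

lemma pvA_eq (size : Int) :
    generate_mixed_dataset_py size = (List.range size.toNat).map (pvItem 0) := by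
  unfold generate_mixed_dataset_py
  by_cases h : 0 ≤ size
  · lift size to Nat using h
    rw [PySem.List.pyRange_zero_natCast, PySem.List.foldl_append_singleton_eq_map, List.map_map]
    refine List.map_congr_left (fun i _ => ?_)
    have hsize : pvTopicsA.size = 10 := rfl
    have hv : PySem.Dict.values pvTopicsA = pvValuesB := rfl
    simp only [Function.comp, pvItem, hsize]
    rw [PySem.Int.mod_natCast, PySem.Int.floordiv_natCast, PySem.List.pyGetD_natCast, hv, zero_add]
  · have hz : size.toNat = 0 := by omega
    have hr : PySem.List.pyRange 0 size 1 = [] := by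
      simp [PySem.List.pyRange]; omega
    simp [hr, hz]

-- ===== VERDICT (by name: the statement is the Claim_ definition above) =====
theorem generate_mixed_dataset_py_spec : Claim_equal_generate_mixed_dataset_py := by
  intro size _
  show generate_mixed_dataset_py size = generate_mixed_dataset_py_alt size
  rw [pvA_eq, generate_mixed_dataset_py_alt, pvFillB_eq]
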